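-- pv_equiv track=rewrite | github.com/thilinicooray/DSA-Practice | graph/AM11_reconstructing_sequence.py | get_dependents
-- ===== SOURCE A (Python) =====
-- def get_dependents(seqs):
--     dep = {}
--     dep_counts = {}
--
--     for seq in seqs:
--         for i in range(len(seq)):
--             if seq[i] not in dep:
--                 dep[seq[i]] = set()
--
--             if seq[i] not in dep_counts:
--                 dep_counts[seq[i]] = 0
--
--             if i >0:
--                 prev = seq[i-1]
--                 cur = seq[i]
--
--                 if cur not in dep[prev]:
--                     dep[prev].add(cur)
--                     dep_counts[cur] += 1
--
--     return dep, dep_counts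
-- ===== SOURCE B (Python) =====
-- def get_dependents(seqs):
--     # Pass 1: build only the adjacency-set graph, walking each sequence
--     # with a running 'prev' variable instead of indexing.
--     dep = {}
--     for seq in seqs:
--         prev = None
--         for cur in seq:
--             if cur not in dep:
--                 dep[cur] = set()
--             if prev is not None:
--                 dep[prev].add(cur)
--             prev = cur
--
--     # Pass 2: derive the in-degree table from the finished graph.
--     dep_counts = {k: 0 for k in dep}
--     for s in dep.values():
--         for t in s:
--             dep_counts[t] += 1
--
--     return dep, dep_counts
-- ===== Notes on version B (the rewrite author's own statement) =====
-- stated objective: alternative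
-- what changed: B builds only the adjacency-set graph in a first pass (walking each sequence with a running prev variable instead of indexing), then derives the in-degree table in a separate second pass over the finished graph, instead of interleaving key insertion, edge insertion and counting in one indexed loop.
import Mathlib
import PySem

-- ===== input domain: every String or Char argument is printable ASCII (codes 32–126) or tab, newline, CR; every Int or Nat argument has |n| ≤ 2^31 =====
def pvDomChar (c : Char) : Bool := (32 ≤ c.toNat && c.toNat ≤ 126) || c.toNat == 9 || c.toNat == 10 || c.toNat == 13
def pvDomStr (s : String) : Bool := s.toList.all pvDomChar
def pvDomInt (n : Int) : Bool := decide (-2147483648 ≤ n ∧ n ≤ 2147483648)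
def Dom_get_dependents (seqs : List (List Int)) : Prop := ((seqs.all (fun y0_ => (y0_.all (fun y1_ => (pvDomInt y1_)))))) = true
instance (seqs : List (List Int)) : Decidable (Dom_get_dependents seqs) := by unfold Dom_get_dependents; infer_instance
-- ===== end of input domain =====

-- B replaces A's single indexed loop (which interleaves key insertion, edge insertion and
-- in-degree counting) by a first pass that builds only the adjacency-set graph and a second
-- pass that derives the in-degree table from the finished graph.

-- ===== PORT A =====
-- inner-loop body of A: one index i of range(len(seq)); pyGetD is exact here since
-- every i drawn from range(len(seq)) (and i-1 under 0 < i) is in range, so Python never raises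
def pvStepA (seq : List Int)
    (st : PySem.Dict Int (PySem.Set Int) × PySem.Dict Int Int) (i : Int) :
    PySem.Dict Int (PySem.Set Int) × PySem.Dict Int Int :=
  let x := PySem.List.pyGetD seq i 0
  let dep := if st.1.contains x then st.1 else st.1.insert x PySem.Set.empty
  let counts := if st.2.contains x then st.2 else st.2.insert x 0
  if 0 < i then
    let prev := PySem.List.pyGetD seq (i - 1) 0
    let cur := x
    let s := dep.getD prev PySem.Set.empty
    if s.contains cur then (dep, counts)
    else (dep.insert prev (s.add cur), counts.modify cur 0 (· + 1))
  else (dep, counts)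

def get_dependents (seqs : List (List Int)) : (List (Int × List Int)) × (List (Int × Int)) :=
  let st := seqs.foldl
    (fun st seq => (PySem.List.pyRange 0 (PySem.List.len seq)).foldl (pvStepA seq) st)
    (PySem.Dict.empty, PySem.Dict.empty)
  (st.1.items, st.2.items)

-- ===== PORT B =====
-- inner-loop body of B's first pass: state = (prev, dep); dep[prev].add(cur) is modify
def pvStepB (st : Option Int × PySem.Dict Int (PySem.Set Int)) (cur : Int) :
    Option Int × PySem.Dict Int (PySem.Set Int) :=
  let dep := if st.2.contains cur then st.2 else st.2.insert cur PySem.Set.empty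
  let dep := match st.1 with
    | some p => dep.modify p PySem.Set.empty (fun s => s.add cur)
    | none => dep
  (some cur, dep)

def get_dependents_alt (seqs : List (List Int)) : (List (Int × List Int)) × (List (Int × Int)) :=
  let dep := seqs.foldl (fun d seq => (seq.foldl pvStepB (none, d)).2) PySem.Dict.empty
  let seed := dep.keys.foldl (fun c k => c.insert k (0 : Int)) PySem.Dict.empty
  let counts := dep.values.foldl
    (fun c s => s.foldl (fun c t => c.modify t 0 (· + 1)) c) seed
  (dep.items, counts.items)

-- ===== PRECONDITION & SPEC =====
def Spec_get_dependents (seqs : List (List Int)) (out : (List (Int × List Int)) × (List (Int × Int))) : Prop := out = get_dependents_alt seqs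
instance (seqs : List (List Int)) (out : (List (Int × List Int)) × (List (Int × Int))) : Decidable (Spec_get_dependents seqs out) := by unfold Spec_get_dependents; infer_instance

-- ===== CLAIM (what is proved, stated in full; the proofs are below) =====
def Claim_equal_get_dependents : Prop := ∀ (seqs : List (List Int)), Dom_get_dependents seqs → Spec_get_dependents seqs (get_dependents seqs)

-- ===== LEMMAS AND PROOFS =====

-- event list of one sequence: (optional predecessor, current element)
def pvEvs (o : Option Int) (xs : List Int) : List (Option Int × Int) :=
  match xs with
  | [] => []
  | c :: cs => (o, c) :: pvEvs (some c) cs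

-- A's inner body at the event level
def pvEA (st : PySem.Dict Int (PySem.Set Int) × PySem.Dict Int Int) (e : Option Int × Int) :
    PySem.Dict Int (PySem.Set Int) × PySem.Dict Int Int :=
  let dep := if st.1.contains e.2 then st.1 else st.1.insert e.2 PySem.Set.empty
  let counts := if st.2.contains e.2 then st.2 else st.2.insert e.2 0
  match e.1 with
  | none => (dep, counts)
  | some p =>
    let s := dep.getD p PySem.Set.empty
    if s.contains e.2 then (dep, counts)
    else (dep.insert p (s.add e.2), counts.modify e.2 0 (· + 1))

-- B's inner body at the event level
def pvEB (dep : PySem.Dict Int (PySem.Set Int)) (e : Option Int × Int) :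
    PySem.Dict Int (PySem.Set Int) :=
  let dep := if dep.contains e.2 then dep else dep.insert e.2 PySem.Set.empty
  match e.1 with
  | some p => dep.modify p PySem.Set.empty (fun s => s.add e.2)
  | none => dep

-- the in-degree table determined by a graph
def pvCnt (dep : PySem.Dict Int (PySem.Set Int)) (k : Int) : Int :=
  ((dep.values).flatten.count k : Int)

def pvMkCounts (dep : PySem.Dict Int (PySem.Set Int)) : PySem.Dict Int Int :=
  PySem.Dict.mk (dep.keys.map (fun k => (k, pvCnt dep k)))

def pvInv (dep : PySem.Dict Int (PySem.Set Int)) (counts : PySem.Dict Int Int) : Prop :=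
  counts = pvMkCounts dep ∧ dep.keys.Nodup ∧ ∀ t ∈ (dep.values).flatten, t ∈ dep.keys

theorem pvEvs_eq_zip (xs : List Int) : ∀ (o : Option Int),
    pvEvs o xs = (o :: xs.map some).zip xs := by
  induction xs with
  | nil => intro o; rfl
  | cons c cs ih => intro o; simp [pvEvs, ih (some c), List.zip]

-- LA: A's indexed inner loop is the fold of pvEA over the event list
theorem pvLA (seq : List Int) (st : PySem.Dict Int (PySem.Set Int) × PySem.Dict Int Int) :
    (PySem.List.pyRange 0 (PySem.List.len seq)).foldl (pvStepA seq) st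
      = (pvEvs none seq).foldl pvEA st := by
  have hlen : ((none :: seq.map some).zip seq).length = seq.length := by
    simp [List.length_zip]
  have hlenI : PySem.List.len seq = PySem.List.len ((none :: seq.map some).zip seq) := by
    simp [PySem.List.len, hlen]
  have main := PySem.List.foldl_pyRange_pyGetD ((none :: seq.map some).zip seq)
      ((none : Option Int), (0 : Int)) pvEA st (a := 0) le_rfl
  simp only [Int.toNat_zero, List.drop_zero] at main
  rw [pvEvs_eq_zip, hlenI, ← main]
  apply PySem.List.foldl_congr_mem
  intro st i hi
  rw [PySem.List.mem_pyRange_one] at hi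
  obtain ⟨h0, h1⟩ := hi
  obtain ⟨k, rfl⟩ := Int.eq_ofNat_of_zero_le h0
  rw [PySem.List.len, hlen] at h1
  have hk : k < seq.length := by exact_mod_cast h1
  have hkz : k < ((none :: seq.map some).zip seq).length := by rw [hlen]; exact hk
  have hget : PySem.List.pyGetD ((none :: seq.map some).zip seq) (k : Int)
      ((none : Option Int), (0 : Int)) = ((none :: seq.map some)[k]'(by simp; omega), seq[k]) := by
    rw [PySem.List.pyGetD_natCast, List.getD_eq_getElem _ _ hkz, List.getElem_zip]
  rw [hget]
  match k, hk with
  | 0, hk =>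
    simp only [pvStepA, pvEA, List.getElem_cons_zero]
    rw [if_neg (by omega)]
    have e0 : PySem.List.pyGetD seq ((0 : Nat) : Int) 0 = seq[0] := by
      rw [PySem.List.pyGetD_natCast, List.getD_eq_getElem _ _ hk]
    rw [e0]
  | (m+1), hk =>
    have hm : m < seq.length := by omega
    simp only [pvStepA, pvEA, List.getElem_cons_succ, List.getElem_map]
    rw [if_pos (by positivity)]
    have e1 : PySem.List.pyGetD seq ((m+1 : Nat) : Int) 0 = seq[m+1] := by
      rw [PySem.List.pyGetD_natCast, List.getD_eq_getElem _ _ hk]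
    have e2 : PySem.List.pyGetD seq (((m+1 : Nat) : Int) - 1) 0 = seq[m] := by
      have : (((m+1 : Nat) : Int) - 1) = ((m : Nat) : Int) := by push_cast; ring
      rw [this, PySem.List.pyGetD_natCast, List.getD_eq_getElem _ _ hm]
    rw [e1, e2]

-- LB: B's first-pass inner loop is the fold of pvEB over the event list
theorem pvLB (xs : List Int) : ∀ (o : Option Int) (d : PySem.Dict Int (PySem.Set Int)),
    (xs.foldl pvStepB (o, d)).2 = (pvEvs o xs).foldl pvEB d := by
  induction xs with
  | nil => intro o d; rfl
  | cons c cs ih => intro o d; simp only [List.foldl_cons, pvEvs]; rw [← ih (some c)]; rfl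

-- raw-list helpers
theorem pv_map_id_of_no_key {ν : Type} (L : List (Int × ν)) (p : Int) (v : ν)
    (h : ∀ q ∈ L, q.1 ≠ p) :
    L.map (fun q => if q.1 == p then (p, v) else q) = L := by
  induction L with
  | nil => rfl
  | cons q L ih =>
    have hq := h q (List.mem_cons_self ..)
    rw [List.map_cons, if_neg (by simp [hq]),
      ih (fun r hr => h r (List.mem_cons_of_mem _ hr))]

theorem pv_insert_getD_self (d : PySem.Dict Int (PySem.Set Int)) (p : Int)
    (hnd : d.keys.Nodup) (hc : d.contains p = true) :
    d.insert p (d.getD p PySem.Set.empty) = d := by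
  obtain ⟨s, hs⟩ := Option.isSome_iff_exists.mp
    (by rw [PySem.Dict.contains_eq_isSome_get?] at hc; exact hc)
  have hmem := PySem.Dict.mem_items_of_get?_eq_some (d := d) (k := p) (v := s) hs
  apply PySem.Dict.ext
  rw [PySem.Dict.items_insert_of_contains d _ hc]
  have hget : d.getD p PySem.Set.empty = s := by
    simp [PySem.Dict.getD_eq_get?_getD, hs]
  rw [hget]
  conv_rhs => rw [← List.map_id d.items]
  apply List.map_congr_left
  intro q hq
  by_cases hqp : q.1 = p
  · have h2 : d.get? q.1 = some q.2 := PySem.Dict.get?_of_mem_items d hq hnd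
    rw [hqp, hs] at h2
    have h3 : q.2 = s := (Option.some_injective _ h2.symm)
    rw [if_pos (show (q.1 == p) = true by simp [hqp]), id_eq, ← hqp, ← h3]
  · simp [hqp]

theorem pv_cnt_replace (L : List (Int × PySem.Set Int)) (p : Int) (s : PySem.Set Int) (c k : Int)
    (hnd : (L.map Prod.fst).Nodup) (hmem : (p, s) ∈ L) :
    ((L.map (fun q => if q.1 == p then (p, s ++ [c]) else q)).map Prod.snd).flatten.count k
      = (L.map Prod.snd).flatten.count k + (if k = c then 1 else 0) := by
  induction L with
  | nil => cases hmem
  | cons q L ih =>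
    have hnd' : (L.map Prod.fst).Nodup := (List.nodup_cons.mp (by simpa using hnd)).2
    rcases List.mem_cons.mp hmem with hq | hq
    · have hnp : ∀ r ∈ L, r.1 ≠ p := by
        intro r hr hrp
        have hpn : q.1 ∉ L.map Prod.fst := (List.nodup_cons.mp (by simpa using hnd)).1
        rw [← hq] at hpn
        exact hpn (List.mem_map.mpr ⟨r, hr, hrp⟩)
      rw [← hq]
      simp only [List.map_cons, beq_self_eq_true, if_pos, pv_map_id_of_no_key L p _ hnp,
        List.flatten_cons, List.count_append]
      simp only [List.count_cons, List.count_nil]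
      by_cases hkc : k = c <;> simp [hkc] <;> omega
    · have hq1 : q.1 ≠ p := by
        intro hqp
        have hpn : q.1 ∉ L.map Prod.fst := (List.nodup_cons.mp (by simpa using hnd)).1
        rw [hqp] at hpn
        exact hpn (List.mem_map.mpr ⟨(p, s), hq, rfl⟩)
      simp only [List.map_cons, if_neg (by simp [hq1] : ¬ ((q.1 == p) = true)),
        List.flatten_cons, List.count_append]
      rw [ih hnd' hq, Nat.add_assoc]

theorem pv_mem_replace (L : List (Int × PySem.Set Int)) (p : Int) (s : PySem.Set Int) (c t : Int)
    (hmem : (p, s) ∈ L)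
    (ht : t ∈ ((L.map (fun q => if q.1 == p then (p, s ++ [c]) else q)).map Prod.snd).flatten) :
    t ∈ (L.map Prod.snd).flatten ∨ t = c := by
  rw [List.map_map] at ht
  obtain ⟨S, hS, htS⟩ := List.mem_flatten.mp ht
  obtain ⟨r, hr, hrS⟩ := List.mem_map.mp hS
  by_cases hrp : (r.1 == p) = true
  · simp only [Function.comp, hrp, if_pos] at hrS
    rw [← hrS] at htS
    rcases List.mem_append.mp htS with h | h
    · exact Or.inl (List.mem_flatten.mpr ⟨s, List.mem_map.mpr ⟨(p, s), hmem, rfl⟩, h⟩)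
    · exact Or.inr (List.mem_singleton.mp h)
  · simp only [Function.comp, hrp] at hrS
    rw [← hrS] at htS
    exact Or.inl (List.mem_flatten.mpr ⟨r.2, List.mem_map.mpr ⟨r, hr, rfl⟩, htS⟩)


theorem pv_mk_keys (dep : PySem.Dict Int (PySem.Set Int)) :
    (pvMkCounts dep).keys = dep.keys := by
  simp [pvMkCounts, PySem.Dict.keys, List.map_map, Function.comp]

theorem pv_mk_contains (dep : PySem.Dict Int (PySem.Set Int)) (x : Int) :
    (pvMkCounts dep).contains x = dep.contains x := by
  rw [PySem.Dict.contains_eq_decide_mem_keys, PySem.Dict.contains_eq_decide_mem_keys, pv_mk_keys]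

theorem pv_mk_nodup (dep : PySem.Dict Int (PySem.Set Int)) (hnd : dep.keys.Nodup) :
    (pvMkCounts dep).keys.Nodup := by rw [pv_mk_keys]; exact hnd

theorem pv_mk_getD (dep : PySem.Dict Int (PySem.Set Int)) (k : Int)
    (hnd : dep.keys.Nodup) (hk : k ∈ dep.keys) :
    (pvMkCounts dep).getD k 0 = pvCnt dep k := by
  exact PySem.Dict.getD_of_mem_items (pvMkCounts dep)
    (List.mem_map.mpr ⟨k, hk, rfl⟩) (pv_mk_nodup dep hnd) 0

-- phase 1 of one event: making sure the current element is a key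
theorem pvP1 (dep : PySem.Dict Int (PySem.Set Int)) (c : Int)
    (hnd : dep.keys.Nodup) (htg : ∀ t ∈ (dep.values).flatten, t ∈ dep.keys) :
    ((if (pvMkCounts dep).contains c then pvMkCounts dep else (pvMkCounts dep).insert c 0)
        = pvMkCounts (if dep.contains c then dep else dep.insert c PySem.Set.empty))
    ∧ (if dep.contains c then dep else dep.insert c PySem.Set.empty).keys.Nodup
    ∧ (∀ t ∈ ((if dep.contains c then dep else dep.insert c PySem.Set.empty).values).flatten,
        t ∈ (if dep.contains c then dep else dep.insert c PySem.Set.empty).keys)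
    ∧ c ∈ (if dep.contains c then dep else dep.insert c PySem.Set.empty).keys
    ∧ (∀ x ∈ dep.keys, x ∈ (if dep.contains c then dep else dep.insert c PySem.Set.empty).keys) := by
  by_cases hc : dep.contains c = true
  · rw [pv_mk_contains, if_pos hc, if_pos hc]
    refine ⟨rfl, hnd, htg, ?_, fun x hx => hx⟩
    rw [PySem.Dict.contains_eq_decide_mem_keys] at hc
    simpa using hc
  · have hcf : dep.contains c = false := by simpa using hc
    have hcm : c ∉ dep.keys := by
      rw [PySem.Dict.contains_eq_decide_mem_keys] at hcf
      simpa using hcf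
    rw [pv_mk_contains, hcf]
    simp only [Bool.false_eq_true, if_false]
    have hitems : (dep.insert c PySem.Set.empty).items = dep.items ++ [(c, PySem.Set.empty)] :=
      PySem.Dict.items_insert_of_not_contains dep _ hcf
    have hkeys : (dep.insert c PySem.Set.empty).keys = dep.keys ++ [c] :=
      PySem.Dict.keys_insert_of_not_contains dep _ hcf
    have hflat : ((dep.insert c PySem.Set.empty).values).flatten = (dep.values).flatten := by
      simp only [PySem.Dict.values]
      rw [hitems]
      simp [PySem.Set.empty]
    have hcnt : ∀ k, pvCnt (dep.insert c PySem.Set.empty) k = pvCnt dep k := by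
      intro k; unfold pvCnt; rw [hflat]
    have hcnt0 : pvCnt dep c = 0 := by
      unfold pvCnt
      have : c ∉ (dep.values).flatten := fun h => hcm (htg c h)
      simp [List.count_eq_zero.mpr this]
    refine ⟨?_, ?_, ?_, ?_, ?_⟩
    · apply PySem.Dict.ext
      rw [PySem.Dict.items_insert_of_not_contains _ _ (by rw [pv_mk_contains]; exact hcf)]
      show (pvMkCounts dep).items ++ [(c, 0)]
        = (dep.insert c PySem.Set.empty).keys.map (fun k => (k, pvCnt (dep.insert c PySem.Set.empty) k))
      rw [hkeys, List.map_append]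
      congr 1
      · show (dep.keys.map (fun k => (k, pvCnt dep k))) = _
        exact List.map_congr_left (fun k _ => by rw [hcnt])
      · simp only [List.map_cons, List.map_nil]
        have h := hcnt c
        rw [hcnt0] at h
        rw [h]
    · rw [hkeys]
      simp [List.nodup_append, hnd]
      exact fun a ha hac => hcm (hac ▸ ha)
    · intro t ht
      rw [hflat] at ht
      rw [hkeys]
      exact List.mem_append_left _ (htg t ht)
    · rw [hkeys]; exact List.mem_append_right _ (List.mem_singleton.mpr rfl)
    · intro x hx; rw [hkeys]; exact List.mem_append_left _ hx

-- phase 2 of one event: inserting the edge prev -> cur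
theorem pvP2 (dep : PySem.Dict Int (PySem.Set Int)) (p c : Int)
    (hnd : dep.keys.Nodup) (htg : ∀ t ∈ (dep.values).flatten, t ∈ dep.keys)
    (hp : p ∈ dep.keys) (hc : c ∈ dep.keys) :
    ((if (dep.getD p PySem.Set.empty).contains c then (dep, pvMkCounts dep)
      else (dep.insert p ((dep.getD p PySem.Set.empty).add c), (pvMkCounts dep).modify c 0 (· + 1)))
      = (dep.modify p PySem.Set.empty (fun s => s.add c),
         pvMkCounts (dep.modify p PySem.Set.empty (fun s => s.add c))))
    ∧ (dep.modify p PySem.Set.empty (fun s => s.add c)).keys.Nodup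
    ∧ (∀ t ∈ ((dep.modify p PySem.Set.empty (fun s => s.add c)).values).flatten,
        t ∈ (dep.modify p PySem.Set.empty (fun s => s.add c)).keys)
    ∧ c ∈ (dep.modify p PySem.Set.empty (fun s => s.add c)).keys := by
  have hcontp : dep.contains p = true := by
    rw [PySem.Dict.contains_eq_decide_mem_keys]; simp [hp]
  have hmodify : dep.modify p PySem.Set.empty (fun s => s.add c)
      = dep.insert p ((dep.getD p PySem.Set.empty).add c) := rfl
  obtain ⟨s0, hget⟩ := Option.isSome_iff_exists.mp
    (by rw [PySem.Dict.contains_eq_isSome_get?] at hcontp; exact hcontp)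
  have hsd : dep.getD p PySem.Set.empty = s0 := by
    simp [PySem.Dict.getD_eq_get?_getD, hget]
  by_cases hsc : (dep.getD p PySem.Set.empty).contains c = true
  · have hadd : (dep.getD p PySem.Set.empty).add c = dep.getD p PySem.Set.empty := by
      simp only [PySem.Set.add]
      rw [if_pos hsc]
    have hid : dep.modify p PySem.Set.empty (fun s => s.add c) = dep := by
      rw [hmodify, hadd]; exact pv_insert_getD_self dep p hnd hcontp
    rw [if_pos hsc, hid]
    exact ⟨rfl, hnd, htg, hc⟩
  · have hscf : (dep.getD p PySem.Set.empty).contains c = false := by simpa using hsc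
    have hadd : (dep.getD p PySem.Set.empty).add c = dep.getD p PySem.Set.empty ++ [c] := by
      simp only [PySem.Set.add]
      rw [if_neg hsc]
    have hmem : (p, s0) ∈ dep.items := PySem.Dict.mem_items_of_get?_eq_some (d := dep) hget
    have hnd' : (dep.items.map Prod.fst).Nodup := hnd
    have hitems2 : (dep.modify p PySem.Set.empty (fun s => s.add c)).items
        = dep.items.map (fun q => if q.1 == p then (p, s0 ++ [c]) else q) := by
      rw [hmodify, hadd, hsd, PySem.Dict.items_insert_of_contains dep _ hcontp]
    have hkeys2 : (dep.modify p PySem.Set.empty (fun s => s.add c)).keys = dep.keys := by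
      rw [hmodify]; exact PySem.Dict.keys_insert_of_contains dep _ hcontp
    have hcnt : ∀ k, pvCnt (dep.modify p PySem.Set.empty (fun s => s.add c)) k
        = pvCnt dep k + (if k = c then 1 else 0) := by
      intro k
      unfold pvCnt
      simp only [PySem.Dict.values, hitems2]
      rw [pv_cnt_replace dep.items p s0 c k hnd' hmem]
      push_cast
      split_ifs <;> simp
    have hcounts : (pvMkCounts dep).modify c 0 (· + 1)
        = pvMkCounts (dep.modify p PySem.Set.empty (fun s => s.add c)) := by
      have hcontc : (pvMkCounts dep).contains c = true := by
        rw [pv_mk_contains, PySem.Dict.contains_eq_decide_mem_keys]; simp [hc]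
      apply PySem.Dict.ext
      show ((pvMkCounts dep).insert c ((pvMkCounts dep).getD c 0 + 1)).items = _
      rw [PySem.Dict.items_insert_of_contains _ _ hcontc, pv_mk_getD dep c hnd hc]
      show (dep.keys.map (fun k => (k, pvCnt dep k))).map
          (fun q => if q.1 == c then (c, pvCnt dep c + 1) else q) = _
      rw [List.map_map]
      show _ = (dep.modify p PySem.Set.empty (fun s => s.add c)).keys.map
        (fun k => (k, pvCnt (dep.modify p PySem.Set.empty (fun s => s.add c)) k))
      rw [hkeys2]
      apply List.map_congr_left
      intro k _
      by_cases hkc : k = c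
      · subst hkc
        have h := hcnt k
        rw [if_pos rfl] at h
        simp only [Function.comp, beq_self_eq_true, if_pos]
        exact congrArg (Prod.mk k) h.symm
      · have h := hcnt k
        rw [if_neg hkc, add_zero] at h
        simp only [Function.comp]
        rw [if_neg (by simp [hkc])]
        exact congrArg (Prod.mk k) h.symm
    refine ⟨?_, ?_, ?_, ?_⟩
    · rw [if_neg hsc, ← hcounts, hmodify]
    · rw [hkeys2]; exact hnd
    · intro t ht
      rw [hkeys2]
      simp only [PySem.Dict.values, hitems2] at ht
      rcases pv_mem_replace dep.items p s0 c t hmem ht with h | h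
      · exact htg t h
      · rw [h]; exact hc
    · rw [hkeys2]; exact hc

-- SE: one event preserves the invariant and keeps the two graphs equal
theorem pvSE (dep : PySem.Dict Int (PySem.Set Int)) (counts : PySem.Dict Int Int)
    (o : Option Int) (c : Int) (hInv : pvInv dep counts)
    (hp : ∀ p, o = some p → p ∈ dep.keys) :
    pvEA (dep, counts) (o, c) = (pvEB dep (o, c), pvMkCounts (pvEB dep (o, c)))
    ∧ pvInv (pvEB dep (o, c)) (pvMkCounts (pvEB dep (o, c)))
    ∧ c ∈ (pvEB dep (o, c)).keys := by
  obtain ⟨hC, hnd, htg⟩ := hInv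
  subst hC
  obtain ⟨e1, hnd1, htg1, hcm1, hmono1⟩ := pvP1 dep c hnd htg
  cases o with
  | none =>
    simp only [pvEA, pvEB]
    exact ⟨by rw [e1], ⟨rfl, hnd1, htg1⟩, hcm1⟩
  | some p =>
    have hp1 : p ∈ (if dep.contains c then dep else dep.insert c PySem.Set.empty).keys :=
      hmono1 p (hp p rfl)
    obtain ⟨e2, hnd2, htg2, hcm2⟩ := pvP2 _ p c hnd1 htg1 hp1 hcm1
    simp only [pvEA, pvEB]
    rw [e1]
    exact ⟨e2, ⟨rfl, hnd2, htg2⟩, hcm2⟩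

-- ME: a whole event list
theorem pvME (xs : List Int) : ∀ (o : Option Int) (dep : PySem.Dict Int (PySem.Set Int))
    (counts : PySem.Dict Int Int), pvInv dep counts → (∀ p, o = some p → p ∈ dep.keys) →
    (pvEvs o xs).foldl pvEA (dep, counts)
      = ((pvEvs o xs).foldl pvEB dep, pvMkCounts ((pvEvs o xs).foldl pvEB dep))
    ∧ pvInv ((pvEvs o xs).foldl pvEB dep) (pvMkCounts ((pvEvs o xs).foldl pvEB dep)) := by
  induction xs with
  | nil =>
    intro o dep counts hInv _
    refine ⟨by simp [pvEvs, hInv.1], ?_⟩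
    simpa [pvEvs, pvInv, ← hInv.1] using hInv
  | cons c cs ih =>
    intro o dep counts hInv hp
    obtain ⟨h1, h2, h3⟩ := pvSE dep counts o c hInv hp
    simp only [pvEvs, List.foldl_cons, h1]
    exact ih (some c) _ _ h2 (by intro p hpc; cases hpc; exact h3)

theorem pv_update_self (s : List Int) (xs : List Int) (h : ∀ x ∈ xs, x ∈ s) :
    PySem.Set.update s xs = s := by
  induction xs generalizing s with
  | nil => rfl
  | cons x xs ih =>
    show PySem.Set.update (PySem.Set.add s x) xs = s
    have hx : PySem.Set.add s x = s := by
      simp [PySem.Set.add, PySem.Set.contains, h x (List.mem_cons_self ..)]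
    rw [hx]
    exact ih s (fun y hy => h y (List.mem_cons_of_mem _ hy))

theorem pv_seed_getD (l : List Int) (d : PySem.Dict Int Int) (k : Int)
    (hd : d.getD k 0 = 0) :
    (l.foldl (fun c x => c.insert x (0 : Int)) d).getD k 0 = 0 := by
  induction l generalizing d with
  | nil => exact hd
  | cons x l ih =>
    simp only [List.foldl_cons]
    exact ih _ (by rw [PySem.Dict.getD_insert]; split_ifs <;> simp [hd])

-- SP: B's second pass computes pvMkCounts
theorem pvSP (dep : PySem.Dict Int (PySem.Set Int)) (hnd : dep.keys.Nodup)
    (htg : ∀ t ∈ (dep.values).flatten, t ∈ dep.keys) :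
    (dep.values).foldl (fun c s => s.foldl (fun c t => c.modify t 0 (· + 1)) c)
      (dep.keys.foldl (fun c k => c.insert k (0 : Int)) PySem.Dict.empty)
      = pvMkCounts dep := by
  rw [← List.foldl_flatten]
  have hseedkeys : (dep.keys.foldl (fun c k => c.insert k (0 : Int)) PySem.Dict.empty).keys
      = dep.keys := by
    rw [PySem.Dict.keys_foldl_insert dep.keys (fun _ _ => (0 : Int)) PySem.Dict.empty]
    show PySem.Set.update PySem.Set.empty dep.keys = dep.keys
    exact PySem.Set.ofList_eq_self_of_nodup dep.keys hnd
  have hkeys : ((dep.values).flatten.foldl (fun c t => c.modify t 0 (· + 1))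
        (dep.keys.foldl (fun c k => c.insert k (0 : Int)) PySem.Dict.empty)).keys
      = dep.keys := by
    rw [PySem.Dict.keys_foldl_modify (dep.values).flatten 0 (fun _ _ v => v + 1), hseedkeys]
    exact pv_update_self dep.keys (dep.values).flatten htg
  have hseedgetD : ∀ k, (dep.keys.foldl (fun c k => c.insert k (0 : Int)) PySem.Dict.empty).getD k 0
      = 0 := fun k => pv_seed_getD dep.keys PySem.Dict.empty k (by simp [PySem.Dict.getD_empty])
  have hgetD : ∀ k, ((dep.values).flatten.foldl (fun c t => c.modify t 0 (· + 1))
        (dep.keys.foldl (fun c k => c.insert k (0 : Int)) PySem.Dict.empty)).getD k 0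
      = pvCnt dep k := by
    intro k
    rw [PySem.Dict.getD_foldl_modify_add_one, hseedgetD k, pvCnt]
    simp
  apply PySem.Dict.ext
  rw [PySem.Dict.items_eq_map_keys _ (by rw [hkeys]; exact hnd) 0, hkeys]
  show _ = dep.keys.map (fun k => (k, pvCnt dep k))
  exact List.map_congr_left (fun k _ => by rw [hgetD k])

theorem pvInv0 : pvInv PySem.Dict.empty PySem.Dict.empty := by
  refine ⟨rfl, ?_, ?_⟩ <;> simp [PySem.Dict.empty, PySem.Dict.keys, PySem.Dict.values]

theorem pvOuter (seqs : List (List Int)) : ∀ (dep : PySem.Dict Int (PySem.Set Int))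
    (counts : PySem.Dict Int Int), pvInv dep counts →
    seqs.foldl (fun st seq => (PySem.List.pyRange 0 (PySem.List.len seq)).foldl (pvStepA seq) st)
        (dep, counts)
      = (seqs.foldl (fun d seq => (seq.foldl pvStepB (none, d)).2) dep,
         pvMkCounts (seqs.foldl (fun d seq => (seq.foldl pvStepB (none, d)).2) dep))
    ∧ pvInv (seqs.foldl (fun d seq => (seq.foldl pvStepB (none, d)).2) dep)
        (pvMkCounts (seqs.foldl (fun d seq => (seq.foldl pvStepB (none, d)).2) dep)) := by
  induction seqs with
  | nil =>
    intro dep counts hInv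
    refine ⟨by simp [hInv.1], ?_⟩
    simpa [pvInv, ← hInv.1] using hInv
  | cons seq rest ih =>
    intro dep counts hInv
    simp only [List.foldl_cons]
    rw [pvLA seq (dep, counts), pvLB seq none dep]
    obtain ⟨hEq, hInv'⟩ := pvME seq none dep counts hInv (fun p h => by cases h)
    rw [hEq]
    exact ih _ _ hInv'

theorem get_dependents_spec : Claim_equal_get_dependents := by
  intro seqs _
  unfold Spec_get_dependents get_dependents get_dependents_alt
  dsimp only
  obtain ⟨hEq, hC, hnd, htg⟩ := pvOuter seqs PySem.Dict.empty PySem.Dict.empty pvInv0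
  rw [hEq, pvSP _ hnd htg]
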